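-- pv_equiv track=rewrite | github.com/PlaidDragon/Automation-Reports | GlobalTracker_Jira.py | getDesc
-- ===== SOURCE A (Python) =====
-- def getDesc(descListIn):
--     descList = descListIn.upper()
--     descList = descList.split("|")
--     descClean = None
--     for m in ['JAN', 'FEB', 'MAR', 'APR', 'MAY', 'JUN', 'JUL', 'AUG', 'SEP', 'OCT', 'NOV', 'DEC', "TBC"]:
--         ind = [idx for idx, s in enumerate(descList) if m in s and len(s) < 11]
--         if len(ind) > 0:
--             descClean = descList[ind[0] - 1]
--             break
--         else:
--             continue
--     if descClean is None:
--         descClean = descListIn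
--     return descClean
-- ===== SOURCE B (Python) =====
-- def getDesc(descListIn):
--     descList = descListIn.upper().split("|")
--     months = ['JAN', 'FEB', 'MAR', 'APR', 'MAY', 'JUN', 'JUL', 'AUG', 'SEP', 'OCT', 'NOV', 'DEC', 'TBC']
--     # one pass: track the lexicographically least (month-rank, element-index) candidate
--     best = None
--     for idx, s in enumerate(descList):
--         if len(s) >= 11:
--             continue
--         for r, m in enumerate(months):
--             if m in s and (best is None or (r, idx) < best):
--                 best = (r, idx)
--     if best is None:
--         return descListIn
--     return descList[best[1] - 1]
-- ===== Notes on version B (the rewrite author's own statement) =====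
-- stated objective: alternative
-- what changed: A makes up to 13 separate full scans of the split list (one per month token, with an intermediate index list each time); B makes a single pass over the elements tracking the lexicographically least (month-rank, element-index) candidate and then indexes once.
import Mathlib
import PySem

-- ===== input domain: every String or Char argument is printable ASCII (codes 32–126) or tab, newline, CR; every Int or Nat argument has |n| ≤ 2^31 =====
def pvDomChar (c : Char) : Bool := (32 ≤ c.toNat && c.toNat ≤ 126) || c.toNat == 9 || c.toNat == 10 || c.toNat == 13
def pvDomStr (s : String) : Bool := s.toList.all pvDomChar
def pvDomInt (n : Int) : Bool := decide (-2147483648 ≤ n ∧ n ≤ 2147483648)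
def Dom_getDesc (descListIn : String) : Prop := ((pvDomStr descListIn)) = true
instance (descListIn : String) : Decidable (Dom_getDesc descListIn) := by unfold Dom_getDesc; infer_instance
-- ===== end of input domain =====

-- B replaces A's up-to-13 separate scans of the split list (one per month token) by a single
-- pass tracking the lexicographically least (month-rank, element-index) candidate; objective: alternative.

def pvMonths : List String :=
  ["JAN", "FEB", "MAR", "APR", "MAY", "JUN", "JUL", "AUG", "SEP", "OCT", "NOV", "DEC", "TBC"]

-- ===== PORT A =====
-- A's for-loop over month tokens; `ind` is the comprehension, the match is the `if len(ind) > 0 … break`.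
-- descList[ind[0]-1] is always in range in Python (split "|" gives a nonempty list, ind[0] ∈ [0,len),
-- and -1 wraps to the last element), so pyGetD's default "" is never used.
def getDescLoopA (descList : List String) : List String → Option String
  | [] => none
  | m :: ms =>
    let ind := ((PySem.List.enumerate descList 0).filter
        (fun p => PySem.Str.isIn m p.2 && decide (PySem.Str.len p.2 < 11))).map (·.1)
    match ind with
    | [] => getDescLoopA descList ms
    | i :: _ => some (PySem.List.pyGetD descList (i - 1) "")

def getDesc (descListIn : String) : String :=
  let descList := (PySem.Str.split? (PySem.Str.upper descListIn) "|").getD []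
  match getDescLoopA descList pvMonths with
  | some s => s
  | none => descListIn

-- ===== PORT B =====
-- Python tuple comparison (r, i) < (r', i')
def pvLexLt (c b : Int × Int) : Bool := c.1 < b.1 || (c.1 == b.1 && c.2 < b.2)

def getDesc_alt (descListIn : String) : String :=
  let descList := (PySem.Str.split? (PySem.Str.upper descListIn) "|").getD []
  let best := (PySem.List.enumerate descList 0).foldl (fun best p =>
      if PySem.Str.len p.2 < 11 then
        (PySem.List.enumerate pvMonths 0).foldl (fun best q =>
          if PySem.Str.isIn q.2 p.2 &&
              (match best with | none => true | some b => pvLexLt (q.1, p.1) b) then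
            some (q.1, p.1)
          else best) best
      else best) none
  match best with
  | none => descListIn
  | some b => PySem.List.pyGetD descList (b.2 - 1) ""

-- ===== PRECONDITION & SPEC =====
def Spec_getDesc (descListIn : String) (out : String) : Prop := out = getDesc_alt descListIn
instance (descListIn : String) (out : String) : Decidable (Spec_getDesc descListIn out) := by unfold Spec_getDesc; infer_instance

-- ===== CLAIM (what is proved, stated in full; the proofs are below) =====
def Claim_equal_getDesc : Prop := ∀ (descListIn : String), Dom_getDesc descListIn → Spec_getDesc descListIn (getDesc descListIn)

-- ===== LEMMAS AND PROOFS =====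

-- the per-element match predicate shared by both sides
def pvHit (m s : String) : Bool := PySem.Str.isIn m s && decide (PySem.Str.len s < 11)

-- pvUpd best c = take c if it is strictly smaller (or best is empty)
def pvUpd (best : Option (Int × Int)) (c : Int × Int) : Option (Int × Int) :=
  match best with
  | none => some c
  | some b => if pvLexLt c b then some c else some b

-- the flattened candidate list of B's nested loops
def pvCands (descList : List String) : List (Int × Int) :=
  (PySem.List.enumerate descList 0).flatMap (fun p =>
    if PySem.Str.len p.2 < 11 then
      ((PySem.List.enumerate pvMonths 0).filter (fun q => PySem.Str.isIn q.2 p.2)).map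
        (fun q => (q.1, p.1))
    else [])

lemma pvLexLt_true_iff (c b : Int × Int) :
    pvLexLt c b = true ↔ (c.1 < b.1 ∨ (c.1 = b.1 ∧ c.2 < b.2)) := by
  unfold pvLexLt
  simp

lemma pvLexLt_false_iff (c b : Int × Int) :
    pvLexLt c b = false ↔ ¬ (c.1 < b.1 ∨ (c.1 = b.1 ∧ c.2 < b.2)) := by
  rw [← Bool.not_eq_true, pvLexLt_true_iff]

lemma mem_pvCands_iff (descList : List String) (c : Int × Int) :
    c ∈ pvCands descList ↔ ∃ k, ∃ (hk : k < descList.length), ∃ j, ∃ (hj : j < pvMonths.length),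
      c = ((j : Int), (k : Int)) ∧ pvHit pvMonths[j] descList[k] = true := by
  unfold pvCands pvHit
  simp only [List.mem_flatMap, PySem.List.mem_enumerate_iff]
  constructor
  · rintro ⟨p, ⟨k, hk, rfl⟩, hp⟩
    split at hp
    · simp only [List.mem_map, List.mem_filter, PySem.List.mem_enumerate_iff] at hp
      rcases hp with ⟨q, ⟨⟨j, hj, rfl⟩, hin⟩, rfl⟩
      exact ⟨k, hk, j, hj, by simp, by simp_all⟩
    · simp at hp
  · rintro ⟨k, hk, j, hj, rfl, hhit⟩
    rw [Bool.and_eq_true, decide_eq_true_iff] at hhit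
    refine ⟨((k : Int), descList[k]), ⟨k, hk, by simp⟩, ?_⟩
    rw [if_pos (by exact hhit.2)]
    simp only [List.mem_map, List.mem_filter, PySem.List.mem_enumerate_iff]
    exact ⟨((j : Int), pvMonths[j]), ⟨⟨j, hj, by simp⟩, hhit.1⟩, by simp⟩

-- B's nested fold is the fold of pvUpd over the flattened candidate list
lemma alt_fold_eq (descList : List String) (acc : Option (Int × Int)) :
    (PySem.List.enumerate descList 0).foldl (fun best p =>
      if PySem.Str.len p.2 < 11 then
        (PySem.List.enumerate pvMonths 0).foldl (fun best q =>
          if PySem.Str.isIn q.2 p.2 &&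
              (match best with | none => true | some b => pvLexLt (q.1, p.1) b) then
            some (q.1, p.1)
          else best) best
      else best) acc
    = (pvCands descList).foldl pvUpd acc := by
  unfold pvCands
  rw [List.foldl_flatMap]
  congr 1
  funext best p
  split
  · rw [List.foldl_map, List.foldl_filter]
    congr 1
    funext b q
    cases b with
    | none => cases h : PySem.Str.isIn q.2 p.2 <;> simp [pvUpd]
    | some b =>
      cases h : PySem.Str.isIn q.2 p.2 <;> cases h2 : pvLexLt (q.1, p.1) b <;>
        simp [pvUpd, h2]
  · simp

lemma foldl_pvUpd_none (C : List (Int × Int)) :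
    ∀ (acc : Option (Int × Int)), C.foldl pvUpd acc = none ↔ acc = none ∧ C = [] := by
  induction C with
  | nil => simp
  | cons c cs ih =>
    intro acc
    simp only [List.foldl_cons, ih]
    constructor
    · rintro ⟨h, rfl⟩
      exfalso
      cases acc with
      | none => exact absurd h (by simp [pvUpd])
      | some b =>
        simp only [pvUpd] at h
        split at h <;> simp_all
    · rintro ⟨rfl, h⟩
      exact absurd h (by simp)

lemma foldl_pvUpd_some (C : List (Int × Int)) :
    ∀ (acc : Option (Int × Int)) (b : Int × Int), C.foldl pvUpd acc = some b →
      (b ∈ C ∨ acc = some b) ∧ (∀ c ∈ C, pvLexLt c b = false) ∧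
      (∀ a, acc = some a → pvLexLt a b = false) := by
  induction C with
  | nil =>
    intro acc b h
    simp only [List.foldl_nil] at h
    refine ⟨Or.inr h, by simp, ?_⟩
    rintro a rfl
    rw [Option.some_inj] at h
    subst h
    rw [pvLexLt_false_iff]
    omega
  | cons c cs ih =>
    intro acc b h
    simp only [List.foldl_cons] at h
    cases acc with
    | none =>
      have hred : pvUpd none c = some c := rfl
      rw [hred] at h
      obtain ⟨hmem, hub, hacc⟩ := ih (some c) b h
      have hcb : pvLexLt c b = false := hacc c rfl
      refine ⟨?_, ?_, by simp⟩
      · rcases hmem with h1 | h1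
        · exact Or.inl (List.mem_cons_of_mem _ h1)
        · rw [Option.some_inj] at h1
          exact Or.inl (h1 ▸ List.mem_cons_self)
      · intro x hx
        rcases List.mem_cons.mp hx with rfl | hx
        · exact hcb
        · exact hub x hx
    | some a =>
      by_cases hlt : pvLexLt c a = true
      · have hred : pvUpd (some a) c = some c := by simp [pvUpd, hlt]
        rw [hred] at h
        obtain ⟨hmem, hub, hacc⟩ := ih (some c) b h
        have hcb : pvLexLt c b = false := hacc c rfl
        have hab : pvLexLt a b = false := by
          rw [pvLexLt_true_iff] at hlt
          rw [pvLexLt_false_iff] at hcb ⊢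
          omega
        refine ⟨?_, ?_, ?_⟩
        · rcases hmem with h1 | h1
          · exact Or.inl (List.mem_cons_of_mem _ h1)
          · rw [Option.some_inj] at h1
            exact Or.inl (h1 ▸ List.mem_cons_self)
        · intro x hx
          rcases List.mem_cons.mp hx with rfl | hx
          · exact hcb
          · exact hub x hx
        · rintro a' ha'
          rw [Option.some_inj] at ha'
          exact ha' ▸ hab
      · rw [Bool.not_eq_true] at hlt
        have hred : pvUpd (some a) c = some a := by simp [pvUpd, hlt]
        rw [hred] at h
        obtain ⟨hmem, hub, hacc⟩ := ih (some a) b h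
        have hab : pvLexLt a b = false := hacc a rfl
        have hcb : pvLexLt c b = false := by
          rw [pvLexLt_false_iff] at hlt hab ⊢
          omega
        refine ⟨?_, ?_, ?_⟩
        · rcases hmem with h1 | h1
          · exact Or.inl (List.mem_cons_of_mem _ h1)
          · exact Or.inr h1
        · intro x hx
          rcases List.mem_cons.mp hx with rfl | hx
          · exact hcb
          · exact hub x hx
        · rintro a' ha'
          rw [Option.some_inj] at ha'
          exact ha' ▸ hab

-- mutually non-less pairs are equal
lemma pvLexLt_antisymm (a b : Int × Int) (h1 : pvLexLt a b = false) (h2 : pvLexLt b a = false) :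
    a = b := by
  rw [pvLexLt_false_iff] at h1 h2
  obtain ⟨x1, x2⟩ := a
  obtain ⟨y1, y2⟩ := b
  simp only [Prod.mk.injEq]
  constructor <;> omega

-- A's loop, when it returns nothing: no month hits anywhere
lemma loopA_none (descList : List String) :
    ∀ M, getDescLoopA descList M = none →
      ∀ m ∈ M, ∀ k, ∀ (hk : k < descList.length), pvHit m descList[k] = false := by
  intro M
  induction M with
  | nil => simp
  | cons m ms ih =>
    intro h m' hm' k hk
    unfold getDescLoopA at h
    rcases hfil : ((PySem.List.enumerate descList 0).filter
        (fun p => PySem.Str.isIn m p.2 && decide (PySem.Str.len p.2 < 11))) with _ | ⟨p, rest⟩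
    · rw [hfil] at h
      simp only [List.map_nil] at h
      rcases List.mem_cons.mp hm' with rfl | hm'
      · by_contra hcon
        rw [Bool.not_eq_false] at hcon
        have : ((k : Int), descList[k]) ∈ (PySem.List.enumerate descList 0).filter
            (fun p => PySem.Str.isIn m' p.2 && decide (PySem.Str.len p.2 < 11)) := by
          rw [List.mem_filter]
          exact ⟨(PySem.List.mem_enumerate_iff _ _ _).mpr ⟨k, hk, by simp⟩, hcon⟩
        rw [hfil] at this
        exact List.not_mem_nil this
      · exact ih h m' hm' k hk
    · rw [hfil] at h
      simp at h

-- filter of enumerate: the head is the FIRST hit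
lemma filter_enumerate_head (descList : List String) (pred : String → Bool) :
    ∀ (s0 : Int) i v rest,
      (PySem.List.enumerate descList s0).filter (fun p => pred p.2) = (i, v) :: rest →
      ∃ kN, ∃ (hk : kN < descList.length), i = s0 + kN ∧ pred descList[kN] = true ∧
        ∀ k', ∀ (h' : k' < kN), pred descList[k'] = false := by
  induction descList with
  | nil => intro s0 i v rest h; simp [PySem.List.enumerate_nil] at h
  | cons x xs ih =>
    intro s0 i v rest h
    rw [PySem.List.enumerate_cons] at h
    by_cases hx : pred x = true
    · rw [List.filter_cons_of_pos (by simpa using hx)] at h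
      rw [List.cons.injEq] at h
      obtain ⟨h1, _⟩ := h
      rw [Prod.mk.injEq] at h1
      refine ⟨0, by simp, by omega, by simpa using hx, by omega⟩
    · rw [List.filter_cons_of_neg (by simpa using hx)] at h
      obtain ⟨kN, hk, hieq, hpred, hmin⟩ := ih (s0 + 1) i v rest h
      refine ⟨kN + 1, by simpa using hk, by omega, by simpa using hpred, ?_⟩
      intro k' h'
      cases k' with
      | zero => simpa using Bool.not_eq_true _ |>.mp hx
      | succ k'' => simpa using hmin k'' (by omega)

-- A's loop, when it returns a value: first month rank j, first element index kN
lemma loopA_some (descList : List String) :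
    ∀ M s, getDescLoopA descList M = some s →
      ∃ j, ∃ (hj : j < M.length), ∃ kN, ∃ (hk : kN < descList.length),
        s = PySem.List.pyGetD descList ((kN : Int) - 1) "" ∧
        pvHit M[j] descList[kN] = true ∧
        (∀ j', ∀ (h : j' < j), ∀ k', ∀ (h' : k' < descList.length),
          pvHit M[j'] descList[k'] = false) ∧
        (∀ k', ∀ (h' : k' < kN), pvHit M[j] descList[k'] = false) := by
  intro M
  induction M with
  | nil => intro s h; simp [getDescLoopA] at h
  | cons m ms ih =>
    intro s h
    unfold getDescLoopA at h
    rcases hfil : ((PySem.List.enumerate descList 0).filter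
        (fun p => PySem.Str.isIn m p.2 && decide (PySem.Str.len p.2 < 11))) with _ | ⟨⟨i, v⟩, rest⟩
    · rw [hfil] at h
      simp only [List.map_nil] at h
      obtain ⟨j, hj, kN, hk, hs, hhit, hmin1, hmin2⟩ := ih s h
      refine ⟨j + 1, by simpa using hj, kN, hk, hs, by simpa using hhit, ?_, by simpa using hmin2⟩
      intro j' hj' k' hk'
      cases j' with
      | zero =>
        simp only [List.getElem_cons_zero]
        by_contra hcon
        rw [Bool.not_eq_false] at hcon
        have : ((k' : Int), descList[k']) ∈ (PySem.List.enumerate descList 0).filter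
            (fun p => PySem.Str.isIn m p.2 && decide (PySem.Str.len p.2 < 11)) := by
          rw [List.mem_filter]
          exact ⟨(PySem.List.mem_enumerate_iff _ _ _).mpr ⟨k', hk', by simp⟩, hcon⟩
        rw [hfil] at this
        exact List.not_mem_nil this
      | succ j'' => simpa using hmin1 j'' (by omega) k' hk'
    · rw [hfil] at h
      simp only [List.map_cons] at h
      rw [Option.some_inj] at h
      obtain ⟨kN, hk, hieq, hpred, hmin⟩ :=
        filter_enumerate_head descList
          (fun t => PySem.Str.isIn m t && decide (PySem.Str.len t < 11)) 0 i v rest hfil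
      refine ⟨0, by simp, kN, hk, ?_, ?_, by omega, ?_⟩
      · rw [← h]; congr 1; omega
      · simpa [pvHit] using hpred
      · intro k' h'
        simpa [pvHit] using hmin k' h'

lemma main_lemma (descList : List String) (descListIn : String) :
    (match getDescLoopA descList pvMonths with
      | some s => s
      | none => descListIn)
    = (match (pvCands descList).foldl pvUpd none with
      | none => descListIn
      | some b => PySem.List.pyGetD descList (b.2 - 1) "") := by
  rcases hA : getDescLoopA descList pvMonths with _ | s
  · -- A found nothing: no hits, so the candidate list is empty
    have hnone : (pvCands descList).foldl pvUpd none = none := by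
      rw [foldl_pvUpd_none]
      refine ⟨rfl, List.eq_nil_iff_forall_not_mem.mpr ?_⟩
      intro c hc
      obtain ⟨k, hk, j, hj, rfl, hhit⟩ := (mem_pvCands_iff _ _).mp hc
      have := loopA_none descList pvMonths hA pvMonths[j] (List.getElem_mem hj) k hk
      rw [this] at hhit
      exact Bool.false_ne_true hhit
    rw [hnone]
  · obtain ⟨j, hj, kN, hk, hs, hhit, hmin1, hmin2⟩ := loopA_some descList pvMonths s hA
    have htmem : ((j : Int), (kN : Int)) ∈ pvCands descList :=
      (mem_pvCands_iff _ _).mpr ⟨kN, hk, j, hj, rfl, hhit⟩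
    have hCne : pvCands descList ≠ [] := by
      intro h
      rw [h] at htmem
      exact List.not_mem_nil htmem
    rcases hB : (pvCands descList).foldl pvUpd none with _ | b
    · rw [foldl_pvUpd_none] at hB
      exact absurd hB.2 hCne
    · obtain ⟨hbmem, hub, -⟩ := foldl_pvUpd_some _ none b hB
      have hbC : b ∈ pvCands descList := by
        rcases hbmem with h | h
        · exact h
        · exact absurd h (by simp)
      -- A's answer index pair is also a lower bound of all candidates
      have htlb : ∀ c ∈ pvCands descList, pvLexLt c ((j : Int), (kN : Int)) = false := by
        intro c hc
        obtain ⟨k', hk', j', hj', rfl, hhit'⟩ := (mem_pvCands_iff _ _).mp hc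
        rw [pvLexLt_false_iff]
        rintro (hlt | ⟨heq, hlt⟩)
        · have hjj : j' < j := by simpa using hlt
          rw [hmin1 j' hjj k' hk'] at hhit'
          exact Bool.false_ne_true hhit'
        · have hje : j' = j := by simpa using heq
          subst hje
          have hkk : k' < kN := by simpa using hlt
          rw [hmin2 k' hkk] at hhit'
          exact Bool.false_ne_true hhit'
      have hbt : b = ((j : Int), (kN : Int)) :=
        pvLexLt_antisymm b _ (htlb b hbC) (hub _ htmem)
      rw [hbt, hs]

lemma main_lemma2 (dl : List String) (x : String) :
    (match getDescLoopA dl pvMonths with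
      | some s => s
      | none => x)
    = (match (PySem.List.enumerate dl 0).foldl (fun best p =>
        if PySem.Str.len p.2 < 11 then
          (PySem.List.enumerate pvMonths 0).foldl (fun best q =>
            if PySem.Str.isIn q.2 p.2 &&
                (match best with | none => true | some b => pvLexLt (q.1, p.1) b) then
              some (q.1, p.1)
            else best) best
        else best) none with
      | none => x
      | some b => PySem.List.pyGetD dl (b.2 - 1) "") := by
  rw [alt_fold_eq]
  exact main_lemma dl x

-- ===== VERDICT (by name: the statement is the Claim_ definition above) =====
theorem getDesc_spec : Claim_equal_getDesc := by
  intro descListIn _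
  show getDesc descListIn = getDesc_alt descListIn
  unfold getDesc getDesc_alt
  exact main_lemma2 _ descListIn
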